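-- pv_equiv track=rewrite | github.com/lllxxa6/jupyter | DM/DM/method/xlsx/xlsx.py | _ten_to_twentysix
-- ===== SOURCE A (Python) =====
-- def _ten_to_twentysix(num):
--     # 二十六进制转化，用于excel表头定位
--     # params：num 十进制数字
--     # return：str 二十六进制字符
--
--     # chr python 默认字符集, 大写字母集
--     sequence = [chr(i) for i in range(65,91)]
--     l = list()
--     if num > 25:
--         while True:
--             d = int(num / 26)
--             remainder = num % 26
--             if d <= 25:
--                 l.insert(0, sequence[remainder])
--                 l.insert(0, sequence[d - 1])
--                 break
--             else:
--                 l.insert(0, sequence[remainder])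
--                 num = d - 1
--     else:
--         l.append(sequence[num])
--     return ''.join(l)
-- ===== SOURCE B (Python) =====
-- def _ten_to_twentysix(num):
--     # Recursive bijective-base-26 conversion: strip the last letter, recurse on the rest.
--     sequence = [chr(i) for i in range(65, 91)]
--     if num <= 25:
--         return sequence[num]
--     return _ten_to_twentysix(int(num / 26) - 1) + sequence[num % 26]
-- ===== Notes on version B (the rewrite author's own statement) =====
-- stated objective: simpler
-- what changed: Replaces A's while-True loop with a break/double-insert accumulator by a three-line recursion on the quotient, which also removes A's spurious leading 'Z' on columns whose name starts with 'Z' and has two or more letters.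
-- intended difference: On inputs whose Excel column name has at least two letters and begins with 'Z' (e.g. 676), A's final iteration indexes sequence[d-1] with d=0 and so prepends an extra 'Z' (A returns 'ZZA' for 676); B returns the intended column name 'ZA'. — e.g. on _ten_to_twentysix(676): A returns "ZZA", B returns "ZA"
import Mathlib
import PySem

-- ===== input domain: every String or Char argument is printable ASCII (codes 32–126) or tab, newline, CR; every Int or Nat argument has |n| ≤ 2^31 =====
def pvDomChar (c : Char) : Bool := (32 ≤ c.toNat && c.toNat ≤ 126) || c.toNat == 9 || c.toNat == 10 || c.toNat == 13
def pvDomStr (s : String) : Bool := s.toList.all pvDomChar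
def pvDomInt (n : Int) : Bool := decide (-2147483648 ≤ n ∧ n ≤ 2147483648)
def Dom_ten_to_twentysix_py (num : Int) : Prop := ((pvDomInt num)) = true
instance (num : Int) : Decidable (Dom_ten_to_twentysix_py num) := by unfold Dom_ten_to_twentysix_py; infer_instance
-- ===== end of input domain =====

-- B replaces A's while-True loop (with its break/double-insert accumulator) by a three-line
-- recursion on the quotient; on column names of ≥ 2 letters starting with 'Z', A prepends a
-- spurious extra 'Z' and B returns the intended name (stated as D_ below).

-- ===== PORT A =====
-- sequence = [chr(i) for i in range(65,91)]
def pvSeqA : List String :=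
  (PySem.List.pyRange 65 91 1).map (fun i => String.ofList [Char.ofNat i.toNat])

-- the 'while True' loop of A, state = (num, l); d = int(num / 26) is ported as floor division,
-- which is exact here: the loop is entered only with num > 25, and for 0 < num ≤ 2^31 CPython's
-- int(num / 26) equals num // 26 (the float quotient is within 2^-26 of the exact value, so
-- truncation cannot cross an integer).  remainder = num % 26.  sequence[i] is pyGet?; inside the
-- loop the index is always in range (-1 included), so the .getD "" default is never used.
def pvLoopA (num : Int) (l : List String) : List String :=
  if PySem.Int.floordiv num 26 ≤ 25 then
    (PySem.List.pyGet? pvSeqA (PySem.Int.floordiv num 26 - 1)).getD "" ::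
      ((PySem.List.pyGet? pvSeqA (PySem.Int.mod num 26)).getD "" :: l)
  else
    pvLoopA (PySem.Int.floordiv num 26 - 1)
      ((PySem.List.pyGet? pvSeqA (PySem.Int.mod num 26)).getD "" :: l)
termination_by num.toNat
decreasing_by
  rw [PySem.Int.floordiv_eq_ediv_of_pos (by norm_num : (0:Int) < 26)] at *
  omega

def ten_to_twentysix_py (num : Int) : String :=
  if num > 25 then
    PySem.Str.join "" (pvLoopA num [])
  else
    -- l.append(sequence[num]); ''.join(l) — sequence[num] raises IndexError for num < -26 (outside Pre_)
    PySem.Str.join "" [(PySem.List.pyGet? pvSeqA num).getD ""]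

-- ===== PORT B =====
-- sequence = [chr(i) for i in range(65, 91)]
def pvSeqB : List String :=
  (PySem.List.pyRange 65 91 1).map (fun i => String.ofList [Char.ofNat i.toNat])

-- recursive: base case sequence[num] for num <= 25 (negative index from the end, pyGet?);
-- otherwise _ten_to_twentysix(int(num / 26) - 1) + sequence[num % 26]; int(num / 26) is floor
-- division, exact here for the same reason as in port A (recursion only reached for num > 25).
def ten_to_twentysix_py_alt (num : Int) : String :=
  if num ≤ 25 then
    (PySem.List.pyGet? pvSeqB num).getD ""
  else
    ten_to_twentysix_py_alt (PySem.Int.floordiv num 26 - 1) ++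
      (PySem.List.pyGet? pvSeqB (PySem.Int.mod num 26)).getD ""
termination_by num.toNat
decreasing_by
  rw [PySem.Int.floordiv_eq_ediv_of_pos (by norm_num : (0:Int) < 26)]
  omega

-- ===== PRECONDITION & SPEC =====
-- Pre_ excludes exactly num < -26, where Python A raises IndexError (sequence[num] out of range).
def Pre_ten_to_twentysix_py (num : Int) : Prop := -26 ≤ num
instance (num : Int) : Decidable (Pre_ten_to_twentysix_py num) := by
  unfold Pre_ten_to_twentysix_py; infer_instance

def pvWitness_ten_to_twentysix_py : Int := 5

-- On inputs whose Excel column name has at least two letters and begins with 'Z' (five intervals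
-- within |num| ≤ 2^31), A's final iteration indexes sequence[d-1] with d = 0 and so prepends an
-- extra 'Z' (A returns "ZZA" for 676); B returns the intended column name ("ZA" for 676).
def D_ten_to_twentysix_py (num : Int) : Prop :=
  ∃ j ∈ Finset.Icc 1 5, 651 * 26 ^ j ≤ 25 * num + 26 ∧ 25 * num + 51 ≤ 676 * 26 ^ j
instance (num : Int) : Decidable (D_ten_to_twentysix_py num) := by
  unfold D_ten_to_twentysix_py; infer_instance

def Spec_ten_to_twentysix_py (num : Int) (out : String) : Prop :=
  ¬ D_ten_to_twentysix_py num → out = ten_to_twentysix_py_alt num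
instance (num : Int) (out : String) : Decidable (Spec_ten_to_twentysix_py num out) := by
  unfold Spec_ten_to_twentysix_py; infer_instance

def pvDiffWitness_ten_to_twentysix_py : Int := 676
def pvDiffWitnessOut_ten_to_twentysix_py : String × String := ("ZZA", "ZA")

-- ===== CLAIM (what is proved, stated in full; the proofs are below) =====
def Claim_unchanged_ten_to_twentysix_py : Prop :=
  ∀ (num : Int), Dom_ten_to_twentysix_py num → Pre_ten_to_twentysix_py num →
    Spec_ten_to_twentysix_py num (ten_to_twentysix_py num)

def Claim_changed_ten_to_twentysix_py : Prop :=
  Dom_ten_to_twentysix_py (pvDiffWitness_ten_to_twentysix_py) ∧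
  Pre_ten_to_twentysix_py (pvDiffWitness_ten_to_twentysix_py) ∧
  D_ten_to_twentysix_py (pvDiffWitness_ten_to_twentysix_py) ∧
  ten_to_twentysix_py (pvDiffWitness_ten_to_twentysix_py) = pvDiffWitnessOut_ten_to_twentysix_py.1 ∧
  ten_to_twentysix_py_alt (pvDiffWitness_ten_to_twentysix_py) = pvDiffWitnessOut_ten_to_twentysix_py.2 ∧
  pvDiffWitnessOut_ten_to_twentysix_py.1 ≠ pvDiffWitnessOut_ten_to_twentysix_py.2

def Claim_exact_ten_to_twentysix_py : Prop :=
  ∀ (num : Int), Dom_ten_to_twentysix_py num → Pre_ten_to_twentysix_py num →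
    D_ten_to_twentysix_py num → ten_to_twentysix_py num ≠ ten_to_twentysix_py_alt num

-- ===== LEMMAS AND PROOFS =====

lemma pv_D_iff (num : Int) : D_ten_to_twentysix_py num ↔
    ((676 ≤ num ∧ num ≤ 701) ∨ (17602 ≤ num ∧ num ≤ 18277) ∨
     (457678 ≤ num ∧ num ≤ 475253) ∨ (11899654 ≤ num ∧ num ≤ 12356629) ∨
     (309391030 ≤ num ∧ num ≤ 321272405)) := by
  unfold D_ten_to_twentysix_py
  constructor
  · rintro ⟨j, hj, hl, hu⟩
    simp only [Finset.mem_Icc] at hj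
    obtain ⟨h1, h5⟩ := hj
    interval_cases j <;> norm_num at hl hu <;> omega
  · intro h
    rcases h with h | h | h | h | h
    · exact ⟨1, by norm_num, by omega, by omega⟩
    · exact ⟨2, by norm_num, by omega, by omega⟩
    · exact ⟨3, by norm_num, by omega, by omega⟩
    · exact ⟨4, by norm_num, by omega, by omega⟩
    · exact ⟨5, by norm_num, by omega, by omega⟩

lemma pv_flatten_intersperse_nil {α : Type} (xss : List (List α)) :
    (List.intersperse ([] : List α) xss).flatten = xss.flatten := by
  induction xss with
  | nil => simp
  | cons a t ih => cases t <;> simp_all [List.intersperse]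

lemma pv_chars_join_nilsep (xss : List (List Char)) :
    PySem.Chars.join [] xss = xss.flatten := by
  simp [PySem.Chars.join, List.intercalate, pv_flatten_intersperse_nil]

lemma pv_join_cons (x : String) (l : List String) :
    PySem.Str.join "" (x :: l) = x ++ PySem.Str.join "" l := by
  apply String.toList_inj.mp
  simp [pv_chars_join_nilsep]

lemma pv_join_single (x : String) : PySem.Str.join "" [x] = x := by
  apply String.toList_inj.mp
  simp

lemma pv_join_append (l1 l2 : List String) :
    PySem.Str.join "" (l1 ++ l2) = PySem.Str.join "" l1 ++ PySem.Str.join "" l2 := by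
  apply String.toList_inj.mp
  simp [pv_chars_join_nilsep]

lemma pv_seqB_eq : pvSeqB = pvSeqA := rfl

-- the loop accumulator: the l already collected is just appended behind the rest of the run
lemma pv_loopA_acc : ∀ (N : Nat) (num : Int), num.toNat < N →
    ∀ l, pvLoopA num l = pvLoopA num [] ++ l := by
  intro N
  induction N with
  | zero => intro num h; exact absurd h (Nat.not_lt_zero _)
  | succ N ih =>
    intro num hlt l
    by_cases hc : PySem.Int.floordiv num 26 ≤ 25
    · have e1 : ∀ l', pvLoopA num l' =
          (PySem.List.pyGet? pvSeqA (PySem.Int.floordiv num 26 - 1)).getD "" ::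
            ((PySem.List.pyGet? pvSeqA (PySem.Int.mod num 26)).getD "" :: l') := by
        intro l'; rw [pvLoopA.eq_def, if_pos hc]
      rw [e1, e1]; simp
    · have e2 : ∀ l', pvLoopA num l' = pvLoopA (PySem.Int.floordiv num 26 - 1)
          ((PySem.List.pyGet? pvSeqA (PySem.Int.mod num 26)).getD "" :: l') := by
        intro l'; rw [pvLoopA.eq_def, if_neg hc]
      have hN : (PySem.Int.floordiv num 26 - 1).toNat < N := by
        rw [PySem.Int.floordiv_eq_ediv_of_pos (by norm_num : (0:Int) < 26)] at hc ⊢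
        omega
      rw [e2, e2, ih _ hN ((PySem.List.pyGet? pvSeqA (PySem.Int.mod num 26)).getD "" :: l),
        ih _ hN [(PySem.List.pyGet? pvSeqA (PySem.Int.mod num 26)).getD ""]]
      simp

-- main invariant: for num ≥ 26 within the integer domain, the joined loop output is B's
-- result, except that on D_ it carries one extra leading 'Z'
lemma pv_main : ∀ (N : Nat) (num : Int), num.toNat < N → 26 ≤ num → num ≤ 2147483648 →
    (¬ D_ten_to_twentysix_py num →
      PySem.Str.join "" (pvLoopA num []) = ten_to_twentysix_py_alt num) ∧
    (D_ten_to_twentysix_py num →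
      PySem.Str.join "" (pvLoopA num []) = "Z" ++ ten_to_twentysix_py_alt num) := by
  intro N
  induction N with
  | zero => intro num h; exact absurd h (Nat.not_lt_zero _)
  | succ N ih =>
    intro num hlt h26 hB
    have hdm : PySem.Int.floordiv num 26 = num / 26 :=
      PySem.Int.floordiv_eq_ediv_of_pos (by norm_num)
    have hmm : PySem.Int.mod num 26 = num % 26 :=
      PySem.Int.mod_eq_emod_of_pos (by norm_num)
    have halt : ten_to_twentysix_py_alt num =
        ten_to_twentysix_py_alt (num / 26 - 1) ++
          (PySem.List.pyGet? pvSeqB (num % 26)).getD "" := by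
      rw [ten_to_twentysix_py_alt.eq_def, hdm, hmm, if_neg (by omega : ¬ num ≤ 25)]
    rw [pvLoopA.eq_def, hdm, hmm]
    by_cases hc : num / 26 ≤ 25
    · -- final iteration with d ≥ 1: both sides are sequence[d-1] ++ sequence[r]
      have hnD : ¬ D_ten_to_twentysix_py num := by
        rw [pv_D_iff]; omega
      have halt2 : ten_to_twentysix_py_alt (num / 26 - 1) =
          (PySem.List.pyGet? pvSeqB (num / 26 - 1)).getD "" := by
        rw [ten_to_twentysix_py_alt.eq_def, if_pos (by omega : num / 26 - 1 ≤ 25)]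
      refine ⟨fun _ => ?_, fun hD => absurd hD hnD⟩
      rw [if_pos hc, halt, halt2, pv_seqB_eq, pv_join_cons, pv_join_single]
    · rw [if_neg hc]
      by_cases h26q : num / 26 = 26
      · -- A's quirk: the next iteration runs on num = 25 and indexes sequence[-1]
        have hD : D_ten_to_twentysix_py num := by
          rw [pv_D_iff]; omega
        refine ⟨fun hnD => absurd hD hnD, fun _ => ?_⟩
        rw [h26q, show (26:Int) - 1 = 25 from by norm_num]
        rw [pvLoopA.eq_def, if_pos (by decide)]
        rw [halt, h26q, show (26:Int) - 1 = 25 from by norm_num]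
        have halt25 : ten_to_twentysix_py_alt 25 =
            (PySem.List.pyGet? pvSeqB 25).getD "" := by
          rw [ten_to_twentysix_py_alt.eq_def, if_pos (by norm_num)]
        rw [halt25, pv_seqB_eq, pv_join_cons, pv_join_cons, pv_join_single]
        rw [show (PySem.List.pyGet? pvSeqA (PySem.Int.floordiv 25 26 - 1)).getD "" = "Z" from by decide]
        rw [show (PySem.List.pyGet? pvSeqA (PySem.Int.mod 25 26)).getD "" = "Z" from by decide]
        rw [show (PySem.List.pyGet? pvSeqA (25:Int)).getD "" = "Z" from by decide]
      · -- d ≥ 27: peel one digit and use the induction hypothesis on num/26 - 1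
        have hrec26 : 26 ≤ num / 26 - 1 := by omega
        have hrecB : num / 26 - 1 ≤ 2147483648 := by omega
        have hN : (num / 26 - 1).toNat < N := by omega
        obtain ⟨ih1, ih2⟩ := ih (num / 26 - 1) hN hrec26 hrecB
        have hstep : D_ten_to_twentysix_py num ↔ D_ten_to_twentysix_py (num / 26 - 1) := by
          rw [pv_D_iff, pv_D_iff]; omega
        have hacc : pvLoopA (num / 26 - 1)
              [(PySem.List.pyGet? pvSeqA (num % 26)).getD ""] =
            pvLoopA (num / 26 - 1) [] ++
              [(PySem.List.pyGet? pvSeqA (num % 26)).getD ""] :=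
          pv_loopA_acc ((num / 26 - 1).toNat + 1) _ (Nat.lt_succ_self _) _
        constructor
        · intro hnD
          rw [hacc, pv_join_append, pv_join_single,
            ih1 (fun hD' => hnD (hstep.mpr hD')), halt, pv_seqB_eq]
        · intro hD
          rw [hacc, pv_join_append, pv_join_single, ih2 (hstep.mp hD), halt, pv_seqB_eq,
            String.append_assoc]

lemma pv_dom_bound {num : Int} (h : Dom_ten_to_twentysix_py num) :
    -2147483648 ≤ num ∧ num ≤ 2147483648 := by
  have := of_decide_eq_true h
  exact this

-- ===== VERDICT (by name: the statement is the Claim_ definition above) =====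
theorem ten_to_twentysix_py_spec : Claim_unchanged_ten_to_twentysix_py := by
  intro num hDom _hPre hnD
  obtain ⟨_, hB⟩ := pv_dom_bound hDom
  unfold ten_to_twentysix_py
  by_cases h : num > 25
  · rw [if_pos h]
    exact (pv_main (num.toNat + 1) num (Nat.lt_succ_self _) (by omega) hB).1 hnD
  · rw [if_neg h, pv_join_single,
      ten_to_twentysix_py_alt.eq_def, if_pos (by omega : num ≤ 25), pv_seqB_eq]

theorem ten_to_twentysix_py_changed : Claim_changed_ten_to_twentysix_py := by
  unfold Claim_changed_ten_to_twentysix_py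
  refine ⟨by decide, by decide, by decide, ?_, ?_, by decide⟩
  · show ten_to_twentysix_py 676 = "ZZA"
    unfold ten_to_twentysix_py
    rw [if_pos (by norm_num)]
    rw [pvLoopA.eq_def, if_neg (by decide)]
    rw [pvLoopA.eq_def, if_pos (by decide)]
    decide
  · show ten_to_twentysix_py_alt 676 = "ZA"
    rw [ten_to_twentysix_py_alt.eq_def, if_neg (by decide)]
    rw [ten_to_twentysix_py_alt.eq_def, if_pos (by decide)]
    decide

theorem ten_to_twentysix_py_tight : Claim_exact_ten_to_twentysix_py := by
  intro num hDom _hPre hD heq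
  obtain ⟨_, hB⟩ := pv_dom_bound hDom
  have h26 : 26 ≤ num := by
    rw [pv_D_iff] at hD; omega
  have hA : ten_to_twentysix_py num = "Z" ++ ten_to_twentysix_py_alt num := by
    unfold ten_to_twentysix_py
    rw [if_pos (by omega : num > 25)]
    exact (pv_main (num.toNat + 1) num (Nat.lt_succ_self _) h26 hB).2 hD
  have hlen : PySem.Str.len (ten_to_twentysix_py num) =
      PySem.Str.len ("Z" : String) + PySem.Str.len (ten_to_twentysix_py_alt num) := by
    rw [hA, PySem.Str.len_append]
  rw [heq] at hlen
  have : PySem.Str.len ("Z" : String) = 1 := by decide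
  omega
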